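-- pv_equiv track=rewrite | github.com/genie360s/nambazasimu | nambazasimu/carrier_identifier.py | identify_carrier
-- ===== SOURCE A (Python) =====
-- def identify_carrier(phone_number):
--     """Identify the carrier of a given Tanzanian phone number"""
--     #Check if the number is in either of the following correct formats "255XXXXXXXXX", "0XXXXXXXXX", "+255XXXXXXXXX"
--     if phone_number.startswith("+255"):
--         phone_number = phone_number[4:]
--     elif phone_number.startswith("255"):
--         phone_number = phone_number[3:]
--     elif phone_number.startswith("0"):
--         phone_number = phone_number[1:]
--
--     #Defines carrier prefixes
--     prefixes = {
--         'Airtel' : ["68", "69", "78"],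
--         'Vodacom' : ["74", "75", "76"],
--         'Tigo' : ["71", "65", "67"],
--         'Zantel' : ["77"],
--         'Halotel' : ["62"],
--         'TTCL' : ["73"],
--         'Smile' : ["66"]
--     }
--
--     #check the carrier
--     for carrier, prefix_list in prefixes.items():
--         if any(phone_number.startswith(prefix) for prefix in prefix_list):
--             return carrier
--
--     return "Unknown"
-- ===== SOURCE B (Python) =====
-- _TABLE = {
--     "68": "Airtel", "69": "Airtel", "78": "Airtel",
--     "74": "Vodacom", "75": "Vodacom", "76": "Vodacom",
--     "71": "Tigo", "65": "Tigo", "67": "Tigo",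
--     "77": "Zantel",
--     "62": "Halotel",
--     "73": "TTCL",
--     "66": "Smile",
-- }
--
-- def identify_carrier(phone_number):
--     """Identify the carrier of a given Tanzanian phone number"""
--     if phone_number.startswith("+255"):
--         phone_number = phone_number[4:]
--     elif phone_number.startswith("255"):
--         phone_number = phone_number[3:]
--     elif phone_number.startswith("0"):
--         phone_number = phone_number[1:]
--     return _TABLE.get(phone_number[:2], "Unknown")
-- ===== Notes on version B (the rewrite author's own statement) =====
-- stated objective: simpler
-- what changed: Replaces the nested scan over carriers and their prefix lists (with a startswith test per prefix) by one flat prefix-to-carrier table indexed by the number's first two characters, a single dictionary lookup.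
import Mathlib
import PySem

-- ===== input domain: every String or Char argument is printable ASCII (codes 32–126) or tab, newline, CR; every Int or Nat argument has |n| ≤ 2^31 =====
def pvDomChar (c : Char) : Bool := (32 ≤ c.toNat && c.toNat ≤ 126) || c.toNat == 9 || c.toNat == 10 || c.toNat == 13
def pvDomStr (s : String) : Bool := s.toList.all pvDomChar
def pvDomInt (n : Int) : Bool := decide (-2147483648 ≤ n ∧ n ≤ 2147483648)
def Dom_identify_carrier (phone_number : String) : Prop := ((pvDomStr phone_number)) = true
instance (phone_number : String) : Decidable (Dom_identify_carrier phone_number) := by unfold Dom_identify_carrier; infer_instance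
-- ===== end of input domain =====

-- B replaces the nested carrier/prefix scan by one flat 2-char-prefix → carrier table lookup (simpler).

-- ===== PORT A =====
-- the normalization guard chain of A
def icNormalize (phone_number : String) : String :=
  if PySem.Str.startswith phone_number "+255" then PySem.Str.slice phone_number (some 4) none
  else if PySem.Str.startswith phone_number "255" then PySem.Str.slice phone_number (some 3) none
  else if PySem.Str.startswith phone_number "0" then PySem.Str.slice phone_number (some 1) none
  else phone_number

def icPrefixes : PySem.Dict String (List String) :=
  PySem.Dict.ofList [("Airtel", ["68", "69", "78"]), ("Vodacom", ["74", "75", "76"]),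
   ("Tigo", ["71", "65", "67"]), ("Zantel", ["77"]), ("Halotel", ["62"]),
   ("TTCL", ["73"]), ("Smile", ["66"])]

-- the 'for carrier, prefix_list in prefixes.items(): if any(...): return carrier' loop
def icLoop (pn : String) : List (String × List String) → String
  | [] => "Unknown"
  | (carrier, prefix_list) :: rest =>
      if prefix_list.any (fun p => PySem.Str.startswith pn p) then carrier else icLoop pn rest

def identify_carrier (phone_number : String) : String :=
  icLoop (icNormalize phone_number) (PySem.Dict.items icPrefixes)

-- ===== PORT B =====
def icTable : PySem.Dict String String :=
  PySem.Dict.ofList [("68", "Airtel"), ("69", "Airtel"), ("78", "Airtel"),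
   ("74", "Vodacom"), ("75", "Vodacom"), ("76", "Vodacom"),
   ("71", "Tigo"), ("65", "Tigo"), ("67", "Tigo"),
   ("77", "Zantel"), ("62", "Halotel"), ("73", "TTCL"), ("66", "Smile")]

def identify_carrier_alt (phone_number : String) : String :=
  let pn :=
    if PySem.Str.startswith phone_number "+255" then PySem.Str.slice phone_number (some 4) none
    else if PySem.Str.startswith phone_number "255" then PySem.Str.slice phone_number (some 3) none
    else if PySem.Str.startswith phone_number "0" then PySem.Str.slice phone_number (some 1) none
    else phone_number
  PySem.Dict.getD icTable (PySem.Str.slice pn none (some 2)) "Unknown"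

-- ===== PRECONDITION & SPEC =====
def Spec_identify_carrier (phone_number : String) (out : String) : Prop := out = identify_carrier_alt phone_number
instance (phone_number : String) (out : String) : Decidable (Spec_identify_carrier phone_number out) := by unfold Spec_identify_carrier; infer_instance

-- ===== CLAIM (what is proved, stated in full; the proofs are below) =====
def Claim_equal_identify_carrier : Prop := ∀ (phone_number : String), Dom_identify_carrier phone_number → Spec_identify_carrier phone_number (identify_carrier phone_number)

-- ===== LEMMAS AND PROOFS =====

-- the core: for ANY string pn, A's nested scan equals B's table lookup on pn's first two characters
theorem icLoop_eq_table (pn : String) :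
    icLoop pn (PySem.Dict.items icPrefixes) =
      PySem.Dict.getD icTable (PySem.Str.slice pn none (some 2)) "Unknown" := by
  have hsl : (PySem.Str.slice pn none (some 2)).toList = pn.toList.take 2 := by
    have h2 := PySem.List.slice_to (xs := pn.toList) (b := 2) (by norm_num)
    simp at h2 ⊢; rw [h2]
  have hkey : ∀ s t : String, s = t ↔ s.toList = t.toList := by
    intro s t
    constructor
    · intro h; rw [h]
    · intro h; have := congrArg String.ofList h; simpa using this
  have hitems : PySem.Dict.items icPrefixes =
      [("Airtel", ["68", "69", "78"]), ("Vodacom", ["74", "75", "76"]),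
       ("Tigo", ["71", "65", "67"]), ("Zantel", ["77"]), ("Halotel", ["62"]),
       ("TTCL", ["73"]), ("Smile", ["66"])] := by decide
  have htab : PySem.Dict.items icTable =
      [("68", "Airtel"), ("69", "Airtel"), ("78", "Airtel"),
       ("74", "Vodacom"), ("75", "Vodacom"), ("76", "Vodacom"),
       ("71", "Tigo"), ("65", "Tigo"), ("67", "Tigo"),
       ("77", "Zantel"), ("62", "Halotel"), ("73", "TTCL"), ("66", "Smile")] := by decide
  have hgetD : ∀ (k d0 : String), PySem.Dict.getD icTable k d0 =
      ((PySem.Dict.items icTable).find? (fun p => p.1 == k) |>.map (·.2)).getD d0 := by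
    intro k d0; simp [PySem.Dict.getD, PySem.Dict.get?]
  have hbeq : ∀ (t : String) (xs : List Char), (t == String.ofList xs) = decide (t.toList = xs) := by
    intro t xs
    by_cases h : t = String.ofList xs
    · subst h; simp
    · have h2 : ¬ t.toList = xs := fun hh => h (by rw [hkey]; simpa using hh)
      simp [h, h2]
  have hk : PySem.Str.slice pn none (some 2) = String.ofList (pn.toList.take 2) := by
    rw [hkey]; simp [hsl]
  rw [hitems, hgetD, htab, hk]
  clear hsl hitems htab hgetD hk
  rcases hl : pn.toList with _ | ⟨c1, _ | ⟨c2, rest⟩⟩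
  · simp [icLoop, PySem.Chars.startswith_iff, hl, List.find?, hbeq]
  · simp [icLoop, PySem.Chars.startswith_iff, hl, List.find?, hbeq]
  · by_cases h68 : ('6' = c1 ∧ '8' = c2)
    · obtain ⟨h1, h2⟩ := h68; subst h1; subst h2
      simp [icLoop, PySem.Chars.startswith_iff, hl, List.find?]
    by_cases h69 : ('6' = c1 ∧ '9' = c2)
    · obtain ⟨h1, h2⟩ := h69; subst h1; subst h2
      simp [icLoop, PySem.Chars.startswith_iff, hl, List.cons_prefix_cons, List.find?, hbeq]
    by_cases h78 : ('7' = c1 ∧ '8' = c2)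
    · obtain ⟨h1, h2⟩ := h78; subst h1; subst h2
      simp [icLoop, PySem.Chars.startswith_iff, hl, List.cons_prefix_cons, List.find?, hbeq]
    by_cases h74 : ('7' = c1 ∧ '4' = c2)
    · obtain ⟨h1, h2⟩ := h74; subst h1; subst h2
      simp [icLoop, PySem.Chars.startswith_iff, hl, List.cons_prefix_cons, List.find?, hbeq]
    by_cases h75 : ('7' = c1 ∧ '5' = c2)
    · obtain ⟨h1, h2⟩ := h75; subst h1; subst h2
      simp [icLoop, PySem.Chars.startswith_iff, hl, List.cons_prefix_cons, List.find?, hbeq]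
    by_cases h76 : ('7' = c1 ∧ '6' = c2)
    · obtain ⟨h1, h2⟩ := h76; subst h1; subst h2
      simp [icLoop, PySem.Chars.startswith_iff, hl, List.cons_prefix_cons, List.find?, hbeq]
    by_cases h71 : ('7' = c1 ∧ '1' = c2)
    · obtain ⟨h1, h2⟩ := h71; subst h1; subst h2
      simp [icLoop, PySem.Chars.startswith_iff, hl, List.cons_prefix_cons, List.find?, hbeq]
    by_cases h65 : ('6' = c1 ∧ '5' = c2)
    · obtain ⟨h1, h2⟩ := h65; subst h1; subst h2
      simp [icLoop, PySem.Chars.startswith_iff, hl, List.cons_prefix_cons, List.find?, hbeq]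
    by_cases h67 : ('6' = c1 ∧ '7' = c2)
    · obtain ⟨h1, h2⟩ := h67; subst h1; subst h2
      simp [icLoop, PySem.Chars.startswith_iff, hl, List.cons_prefix_cons, List.find?, hbeq]
    by_cases h77 : ('7' = c1 ∧ '7' = c2)
    · obtain ⟨h1, h2⟩ := h77; subst h1; subst h2
      simp [icLoop, PySem.Chars.startswith_iff, hl, List.cons_prefix_cons, List.find?, hbeq]
    by_cases h62 : ('6' = c1 ∧ '2' = c2)
    · obtain ⟨h1, h2⟩ := h62; subst h1; subst h2
      simp [icLoop, PySem.Chars.startswith_iff, hl, List.cons_prefix_cons, List.find?, hbeq]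
    by_cases h73 : ('7' = c1 ∧ '3' = c2)
    · obtain ⟨h1, h2⟩ := h73; subst h1; subst h2
      simp [icLoop, PySem.Chars.startswith_iff, hl, List.cons_prefix_cons, List.find?, hbeq]
    by_cases h66 : ('6' = c1 ∧ '6' = c2)
    · obtain ⟨h1, h2⟩ := h66; subst h1; subst h2
      simp [icLoop, PySem.Chars.startswith_iff, hl, List.cons_prefix_cons, List.find?, hbeq]
    simp [icLoop, PySem.Chars.startswith_iff, hl, List.cons_prefix_cons, hbeq, List.find?, h68, h69, h78, h74, h75, h76, h71, h65, h67, h77, h62, h73, h66]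

-- ===== VERDICT (by name: the statement is the Claim_ definition above) =====
theorem identify_carrier_spec : Claim_equal_identify_carrier := by
  intro pn _
  unfold Spec_identify_carrier identify_carrier identify_carrier_alt icNormalize
  exact icLoop_eq_table _
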